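-- pv_equiv track=rewrite | github.com/pypi-data/pypi-mirror-392 | packages/graph_ragu/graph_ragu-1.0.3-py3-none-any.whl/ragu/search_engine/bfs_search.py | _get_all_possible_entities
-- ===== SOURCE A (Python) =====
-- import string
-- from itertools import combinations
-- from typing import List
--
-- def _get_all_possible_entities(entities: List[str]):
--     """
--     Generates all possible combinations of entities.
--
--     :param entities: List of entities.
--     :return: A list of all possible entity_name combinations.
--     """
--
--     unique_phrases = set()
--     for s in entities:
--         cleaned = s.translate(str.maketrans('', '', string.punctuation))
--         words = cleaned.split()
--         unique_phrases.add(cleaned)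
--
--         for i in range(1, len(words) + 1):
--             for combo in combinations(words, i):
--                 unique_phrases.add(" ".join(combo))
--
--     return list(unique_phrases)
-- ===== SOURCE B (Python) =====
-- import string
--
-- def _get_all_possible_entities(entities):
--     """
--     Generates all possible combinations of entities.
--
--     :param entities: List of entities.
--     :return: A list of all possible entity_name combinations.
--     """
--     punct = set(string.punctuation)
--     unique_phrases = set()
--     for s in entities:
--         cleaned = ''.join(ch for ch in s if ch not in punct)
--         unique_phrases.add(cleaned)
--         words = cleaned.split()
--         # Breadth-first expansion: each level holds (phrase, words still to the
--         # right); phrases are built incrementally by extending shorter phrases.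
--         level = [(words[i], words[i + 1:]) for i in range(len(words))]
--         while level:
--             nxt = []
--             for phrase, rest in level:
--                 unique_phrases.add(phrase)
--                 for j, w in enumerate(rest):
--                     nxt.append((phrase + ' ' + w, rest[j + 1:]))
--             level = nxt
--     return list(unique_phrases)
-- ===== Notes on version B (the rewrite author's own statement) =====
-- stated objective: alternative
-- what changed: Replaces the per-size itertools.combinations sweep (each phrase joined from scratch) with a breadth-first level expansion that builds each phrase incrementally by extending the previous level's phrases with the words remaining to their right.
import Mathlib
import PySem

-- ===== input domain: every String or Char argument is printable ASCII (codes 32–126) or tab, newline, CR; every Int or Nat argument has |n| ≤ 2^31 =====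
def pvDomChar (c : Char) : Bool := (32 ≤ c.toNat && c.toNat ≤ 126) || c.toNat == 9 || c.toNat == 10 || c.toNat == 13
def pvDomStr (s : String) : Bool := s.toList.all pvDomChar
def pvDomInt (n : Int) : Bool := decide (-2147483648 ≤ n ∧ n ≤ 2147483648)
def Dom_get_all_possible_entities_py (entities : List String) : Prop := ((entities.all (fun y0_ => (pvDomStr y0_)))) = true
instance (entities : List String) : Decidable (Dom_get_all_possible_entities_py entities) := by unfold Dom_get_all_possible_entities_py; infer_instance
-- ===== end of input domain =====

-- B replaces the per-size itertools.combinations sweep with a breadth-first level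
-- expansion building each phrase incrementally (alternative decomposition, same cost).

-- ===== PORT A =====
-- string.punctuation: ASCII 33-47, 58-64, 91-96, 123-126
def pvIsPunct (c : Char) : Bool :=
  (33 ≤ c.toNat && c.toNat ≤ 47) || (58 ≤ c.toNat && c.toNat ≤ 64) ||
  (91 ≤ c.toNat && c.toNat ≤ 96) || (123 ≤ c.toNat && c.toNat ≤ 126)

-- s.translate(str.maketrans('', '', string.punctuation)) deletes exactly the punctuation chars
def pvClean (s : String) : String := String.ofList (s.toList.filter (fun c => !pvIsPunct c))

-- itertools.combinations(ws, k): index-lexicographic order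
def pvCombos : Nat → List String → List (List String)
  | 0, _ => [[]]
  | _ + 1, [] => []
  | k + 1, w :: ws => (pvCombos k ws).map (fun c => w :: c) ++ pvCombos (k + 1) ws

def get_all_possible_entities_py (entities : List String) : List String :=
  entities.foldl (fun acc s =>
    let cleaned := pvClean s
    let words := PySem.Str.split₀ cleaned
    let acc1 := PySem.Set.add acc cleaned
    (PySem.List.pyRange 1 ((words.length : Int) + 1) 1).foldl (fun a i =>
      (pvCombos i.toNat words).foldl (fun a combo =>
        PySem.Set.add a (PySem.Str.join " " combo)) a) acc1) []

-- ===== PORT B =====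
-- [(words[i], words[i+1:]) for i in range(len(words))]
def pvSplits : List String → List (String × List String)
  | [] => []
  | w :: ws => (w, ws) :: pvSplits ws

-- for j, w in enumerate(rest): nxt.append((phrase + ' ' + w, rest[j+1:]))
def pvChildren (p : String) : List String → List (String × List String)
  | [] => []
  | w :: ws => (PySem.Str.join " " [p, w], ws) :: pvChildren p ws

-- 'while level:' loop; fuel = len(words) bounds the number of levels, the
-- empty-level pattern is the loop's real exit condition
def pvBfs : Nat → List (String × List String) → PySem.Set String → PySem.Set String
  | _, [], acc => acc
  | 0, _, acc => acc
  | fuel + 1, level, acc =>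
      let st := level.foldl
        (fun (st : PySem.Set String × List (String × List String)) e =>
          (PySem.Set.add st.1 e.1, st.2 ++ pvChildren e.1 e.2)) (acc, [])
      pvBfs fuel st.2 st.1

def get_all_possible_entities_py_alt (entities : List String) : List String :=
  entities.foldl (fun acc s =>
    let cleaned := pvClean s
    let acc1 := PySem.Set.add acc cleaned
    let words := PySem.Str.split₀ cleaned
    pvBfs words.length (pvSplits words) acc1) []

-- ===== PRECONDITION & SPEC =====
def Spec_get_all_possible_entities_py (entities : List String) (out : List String) : Prop := out = get_all_possible_entities_py_alt entities
instance (entities : List String) (out : List String) : Decidable (Spec_get_all_possible_entities_py entities out) := by unfold Spec_get_all_possible_entities_py; infer_instance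

-- ===== CLAIM (what is proved, stated in full; the proofs are below) =====
def Claim_equal_get_all_possible_entities_py : Prop := ∀ (entities : List String), Dom_get_all_possible_entities_py entities → Spec_get_all_possible_entities_py entities (get_all_possible_entities_py entities)

-- ===== LEMMAS AND PROOFS =====

-- proof-side characterisation: pvT p ws k = all extensions of phrase p by k words
-- chosen left-to-right from ws, each paired with the words remaining to its right
def pvT : String → List String → Nat → List (String × List String)
  | p, ws, 0 => [(p, ws)]
  | _, [], _ + 1 => []
  | p, w :: ws, k + 1 => pvT (PySem.Str.join " " [p, w]) ws k ++ pvT p ws (k + 1)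

def pvF : List String → Nat → List (String × List String)
  | [], _ => []
  | w :: ws, k => pvT w ws k ++ pvF ws k

-- phrases added by the bfs loop from level pvF ws k on, with fuel f
def pvAll (ws : List String) : Nat → Nat → List String
  | _, 0 => []
  | k, f + 1 =>
      if pvF ws k = [] then []
      else (pvF ws k).map Prod.fst ++ pvAll ws (k + 1) f

lemma pv_foldl_update_flatMap {α : Type} (l : List α) (g : α → List String)
    (acc : PySem.Set String) :
    l.foldl (fun a x => PySem.Set.update a (g x)) acc
      = PySem.Set.update acc (l.flatMap g) := by
  induction l generalizing acc with
  | nil => simp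
  | cons x xs ih => simp [List.flatMap_cons, PySem.Set.update_append, ih]

lemma pv_bfs_inner (level : List (String × List String)) (acc : PySem.Set String)
    (nxt0 : List (String × List String)) :
    level.foldl (fun (st : PySem.Set String × List (String × List String)) e =>
        (PySem.Set.add st.1 e.1, st.2 ++ pvChildren e.1 e.2)) (acc, nxt0)
      = (PySem.Set.update acc (level.map Prod.fst),
         nxt0 ++ level.flatMap (fun e => pvChildren e.1 e.2)) := by
  induction level generalizing acc nxt0 with
  | nil => simp [PySem.Set.update_nil]
  | cons e l ih => simp [List.foldl_cons, ih, PySem.Set.update_cons]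

lemma pv_children_eq_T (p : String) (ws : List String) : pvChildren p ws = pvT p ws 1 := by
  induction ws generalizing p with
  | nil => rfl
  | cons w ws ih => simp [pvChildren, pvT, ih]

lemma pv_flatMap_children_T (ws : List String) (k : Nat) (p : String) :
    (pvT p ws k).flatMap (fun e => pvChildren e.1 e.2) = pvT p ws (k + 1) := by
  induction ws generalizing k p with
  | nil =>
    cases k with
    | zero => simp [pvT, pvChildren]
    | succ k => rfl
  | cons w ws ih =>
    cases k with
    | zero => simp [pvT, pv_children_eq_T]
    | succ k => simp [pvT, List.flatMap_append, ih]

lemma pv_flatMap_children_F (ws : List String) (k : Nat) :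
    (pvF ws k).flatMap (fun e => pvChildren e.1 e.2) = pvF ws (k + 1) := by
  induction ws with
  | nil => rfl
  | cons w ws ih => simp [pvF, List.flatMap_append, ih, pv_flatMap_children_T]

lemma pv_splits_eq_F (ws : List String) : pvSplits ws = pvF ws 0 := by
  induction ws with
  | nil => rfl
  | cons w ws ih => simp [pvSplits, pvF, pvT, ih]

lemma pv_T_eq_nil_iff (ws : List String) (k : Nat) (p : String) :
    pvT p ws k = [] ↔ ws.length < k := by
  induction ws generalizing k p with
  | nil =>
    cases k with
    | zero => simp [pvT]
    | succ k => simp [pvT]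
  | cons w ws ih =>
    cases k with
    | zero => simp [pvT]
    | succ k =>
      simp only [pvT, List.append_eq_nil_iff, ih, List.length_cons]
      omega

lemma pv_F_eq_nil_iff (ws : List String) (k : Nat) :
    pvF ws k = [] ↔ ws.length ≤ k := by
  induction ws with
  | nil => simp [pvF]
  | cons w ws ih =>
    simp only [pvF, List.append_eq_nil_iff, pv_T_eq_nil_iff, ih, List.length_cons]
    omega

-- join over a nonempty word list = incremental left fold of pairwise joins
lemma pv_join_cons (c : List String) (w : String) :
    PySem.Str.join " " (w :: c)
      = c.foldl (fun a x => PySem.Str.join " " [a, x]) w := by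
  induction c generalizing w with
  | nil => simp [PySem.Str.join, PySem.Chars.join_singleton]
  | cons x c ih =>
    have h2 : PySem.Str.join " " (w :: x :: c)
        = PySem.Str.join " " (PySem.Str.join " " [w, x] :: c) := by
      cases c with
      | nil =>
        simp [PySem.Str.join, PySem.Chars.join_singleton, PySem.Chars.join_cons_cons]
      | cons y c =>
        simp [PySem.Str.join, PySem.Chars.join_cons_cons, PySem.Chars.join_singleton]
    rw [h2, ih, List.foldl_cons]

lemma pv_T_map_fst (ws : List String) (k : Nat) (p : String) :
    (pvT p ws k).map Prod.fst
      = (pvCombos k ws).map (fun c => c.foldl (fun a x => PySem.Str.join " " [a, x]) p) := by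
  induction ws generalizing k p with
  | nil =>
    cases k with
    | zero => simp [pvT, pvCombos]
    | succ k => rfl
  | cons w ws ih =>
    cases k with
    | zero => simp [pvT, pvCombos]
    | succ k =>
      simp only [pvT, pvCombos, List.map_append, List.map_map, ih,
        Function.comp_def, List.foldl_cons]

lemma pv_combos_join_eq_F (ws : List String) (k : Nat) :
    (pvCombos (k + 1) ws).map (PySem.Str.join " ")
      = (pvF ws k).map Prod.fst := by
  induction ws generalizing k with
  | nil => rfl
  | cons w ws ih =>
    show ((pvCombos k ws).map (fun c => w :: c) ++ pvCombos (k + 1) ws).map _ = _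
    rw [List.map_append, List.map_map]
    have hF : pvF (w :: ws) k = pvT w ws k ++ pvF ws k := rfl
    rw [hF, List.map_append, pv_T_map_fst, ← ih]
    congr 1
    apply List.map_congr_left
    intro c _
    exact pv_join_cons c w

lemma pv_bfs_eq_update (ws : List String) (fuel k : Nat) (acc : PySem.Set String)
    (h : ws.length ≤ k + fuel) :
    pvBfs fuel (pvF ws k) acc = PySem.Set.update acc (pvAll ws k fuel) := by
  induction fuel generalizing k acc with
  | zero =>
    have he : pvF ws k = [] := (pv_F_eq_nil_iff ws k).2 (by omega)
    simp [he, pvBfs, pvAll, PySem.Set.update_nil]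
  | succ fuel ih =>
    by_cases he : pvF ws k = []
    · simp [he, pvBfs, pvAll, PySem.Set.update_nil]
    · cases hF : pvF ws k with
      | nil => exact absurd hF he
      | cons e l =>
        have hbfs : pvBfs (fuel + 1) (pvF ws k) acc
            = pvBfs fuel (pvF ws (k + 1))
                (PySem.Set.update acc ((pvF ws k).map Prod.fst)) := by
          rw [hF]
          show pvBfs fuel ((e :: l).foldl
              (fun (st : PySem.Set String × List (String × List String)) e =>
                (PySem.Set.add st.1 e.1, st.2 ++ pvChildren e.1 e.2)) (acc, [])).2
              ((e :: l).foldl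
              (fun (st : PySem.Set String × List (String × List String)) e =>
                (PySem.Set.add st.1 e.1, st.2 ++ pvChildren e.1 e.2)) (acc, [])).1 = _
          rw [pv_bfs_inner, ← hF, List.nil_append, pv_flatMap_children_F]
        rw [← hF, hbfs, ih (k + 1) _ (by omega), pvAll, if_neg he,
          PySem.Set.update_append]

lemma pv_all_eq_flatMap (ws : List String) (fuel k : Nat) :
    pvAll ws k fuel
      = (List.range' k fuel).flatMap (fun j => (pvF ws j).map Prod.fst) := by
  induction fuel generalizing k with
  | zero => rfl
  | succ fuel ih =>
    rw [pvAll, List.range'_succ, List.flatMap_cons, ih (k + 1)]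
    by_cases he : pvF ws k = []
    · have hlen : ws.length ≤ k := (pv_F_eq_nil_iff ws k).1 he
      rw [if_pos he, he]
      have h2 : (List.range' (k + 1) fuel).flatMap
          (fun j => (pvF ws j).map Prod.fst) = [] := by
        rw [List.flatMap_eq_nil_iff]
        intro j hj
        rw [List.mem_range'] at hj
        obtain ⟨i, _, hji⟩ := hj
        rw [(pv_F_eq_nil_iff ws j).2 (by omega)]
        rfl
      simp [h2]
    · rw [if_neg he]

-- per-string step: A's combinations-by-size fold = B's bfs loop
lemma pv_step (acc1 : PySem.Set String) (ws : List String) :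
    (PySem.List.pyRange 1 ((ws.length : Int) + 1) 1).foldl (fun a i =>
      (pvCombos i.toNat ws).foldl (fun a combo =>
        PySem.Set.add a (PySem.Str.join " " combo)) a) acc1
    = pvBfs ws.length (pvSplits ws) acc1 := by
  have hlen : ((ws.length : Int) + 1 - 1).toNat = ws.length := by omega
  have hrange : PySem.List.pyRange 1 ((ws.length : Int) + 1) 1
      = (List.range ws.length).map (fun k : Nat => (1 : Int) + (k : Int)) := by
    rw [PySem.List.pyRange_one, hlen]
  rw [hrange, List.foldl_map]
  have hfun : (fun (a : PySem.Set String) (k : Nat) =>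
        (pvCombos ((1 : Int) + k).toNat ws).foldl (fun a combo =>
          PySem.Set.add a (PySem.Str.join " " combo)) a)
      = fun a k => PySem.Set.update a ((pvCombos (k + 1) ws).map (PySem.Str.join " ")) := by
    funext a k
    have hk : ((1 : Int) + k).toNat = k + 1 := by omega
    rw [hk, PySem.Set.update_map_eq_foldl_add]
  rw [hfun, pv_foldl_update_flatMap]
  have hflat : (List.range ws.length).flatMap
        (fun k => (pvCombos (k + 1) ws).map (PySem.Str.join " "))
      = (List.range ws.length).flatMap (fun j => (pvF ws j).map Prod.fst) := by
    apply List.flatMap_congr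
    intro k _
    exact pv_combos_join_eq_F ws k
  rw [hflat, List.range_eq_range', ← pv_all_eq_flatMap,
    ← pv_bfs_eq_update ws ws.length 0 acc1 (by omega), pv_splits_eq_F]

lemma pv_fold_eq (entities : List String) (acc : PySem.Set String) :
    entities.foldl (fun acc s =>
      let cleaned := pvClean s
      let words := PySem.Str.split₀ cleaned
      let acc1 := PySem.Set.add acc cleaned
      (PySem.List.pyRange 1 ((words.length : Int) + 1) 1).foldl (fun a i =>
        (pvCombos i.toNat words).foldl (fun a combo =>
          PySem.Set.add a (PySem.Str.join " " combo)) a) acc1) acc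
    = entities.foldl (fun acc s =>
      let cleaned := pvClean s
      let acc1 := PySem.Set.add acc cleaned
      let words := PySem.Str.split₀ cleaned
      pvBfs words.length (pvSplits words) acc1) acc := by
  induction entities generalizing acc with
  | nil => simp only [List.foldl_nil]
  | cons s es ih =>
    rw [List.foldl_cons, List.foldl_cons]
    simp only []
    rw [pv_step]
    exact ih _

-- ===== VERDICT (by name: the statement is the Claim_ definition above) =====
theorem get_all_possible_entities_py_spec : Claim_equal_get_all_possible_entities_py := by
  intro entities _
  show get_all_possible_entities_py entities = get_all_possible_entities_py_alt entities
  unfold get_all_possible_entities_py get_all_possible_entities_py_alt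
  exact pv_fold_eq entities []
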